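-- pv_equiv track=rewrite | github.com/CharlesAverill/presenter99 | scripts/imgconverter.py | split_rle_runs_to_rows
-- ===== SOURCE A (Python) =====
-- def split_rle_runs_to_rows(rle_runs, row_width=32):
--     rows = []
--     current_row = []
--     cols = 0
--
--     for code, count in rle_runs:
--         while count > 0:
--             space_left = row_width - cols
--             use = min(count, space_left)
--             current_row.append((code, use))
--             cols += use
--             count -= use
--
--             if cols == row_width:
--                 rows.append(current_row)
--                 current_row = []
--                 cols = 0
--
--     if current_row:
--         rows.append(current_row)
--
--     return rows
-- ===== SOURCE B (Python) =====
-- def split_rle_runs_to_rows(rle_runs, row_width=32):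
--     # Pass 1: closed-form segmentation — each run becomes a first segment that
--     # fills the current row, whole-row segments via divmod, and a partial tail.
--     segments = []
--     cols = 0
--     for code, count in rle_runs:
--         if count <= 0:
--             continue
--         first = min(count, row_width - cols)
--         segments.append((code, first))
--         rest = count - first
--         full, partial = divmod(rest, row_width)
--         segments.extend((code, row_width) for _ in range(full))
--         if partial:
--             segments.append((code, partial))
--         cols = (cols + count) % row_width
--     # Pass 2: group boundary-respecting segments into rows.
--     rows = []
--     row = []
--     w = 0
--     for seg in segments:
--         row.append(seg)
--         w += seg[1]
--         if w == row_width: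
--             rows.append(row)
--             row = []
--             w = 0
--     if row:
--         rows.append(row)
--     return rows
-- ===== Notes on version B (the rewrite author's own statement) =====
-- stated objective: alternative
-- what changed: A's nested while loop that peels one segment per iteration with inline row flushing is replaced by a two-pass design: a closed-form segmentation per run (first segment by min, whole rows via divmod, partial tail) followed by a separate fold that groups segments into rows.
import Mathlib
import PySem

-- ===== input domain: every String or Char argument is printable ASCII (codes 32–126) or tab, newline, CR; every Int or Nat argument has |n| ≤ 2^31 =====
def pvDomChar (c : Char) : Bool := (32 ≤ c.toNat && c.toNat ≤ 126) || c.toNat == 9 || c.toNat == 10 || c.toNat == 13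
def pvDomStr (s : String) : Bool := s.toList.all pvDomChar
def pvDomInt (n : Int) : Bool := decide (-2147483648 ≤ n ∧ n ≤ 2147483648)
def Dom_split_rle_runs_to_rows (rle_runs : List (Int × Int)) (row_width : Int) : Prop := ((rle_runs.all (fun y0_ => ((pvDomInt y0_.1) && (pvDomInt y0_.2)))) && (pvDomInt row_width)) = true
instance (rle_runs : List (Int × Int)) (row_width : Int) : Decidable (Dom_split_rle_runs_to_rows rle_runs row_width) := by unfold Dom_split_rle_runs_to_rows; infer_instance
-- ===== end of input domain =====

-- B replaces A's nested while loop by closed-form per-run segmentation (divmod) plus a separate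
-- row-grouping pass; objective: alternative decomposition, same cost.


-- ===== PORT A =====
-- the inner 'while count > 0' loop; fuel = count.toNat iterations suffice whenever
-- 0 < row_width (each iteration consumes use ≥ 1 of count)
def pvA_inner (row_width : Int) : Nat → Int → Int →
    List (List (Int × Int)) × List (Int × Int) × Int →
    List (List (Int × Int)) × List (Int × Int) × Int
  | 0, _, _, st => st
  | fuel+1, code, count, (rows, cur, cols) =>
    if 0 < count then
      let use := min count (row_width - cols)
      let cur' := cur ++ [(code, use)]
      let cols' := cols + use
      let count' := count - use
      if cols' = row_width then
        pvA_inner row_width fuel code count' (rows ++ [cur'], [], 0)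
      else
        pvA_inner row_width fuel code count' (rows, cur', cols')
    else (rows, cur, cols)

def split_rle_runs_to_rows (rle_runs : List (Int × Int)) (row_width : Int) : List (List (Int × Int)) :=
  let st := rle_runs.foldl (fun st p => pvA_inner row_width p.2.toNat p.1 p.2 st)
    (([], [], 0) : List (List (Int × Int)) × List (Int × Int) × Int)
  if st.2.1 ≠ [] then st.1 ++ [st.2.1] else st.1

-- ===== PORT B =====
-- closed-form segments of one run entered at column cols (Source B pass 1 body)
def pvB_segs (row_width cols code count : Int) : List (Int × Int) :=
  let first := min count (row_width - cols)
  let rest := count - first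
  let full := PySem.Int.floordiv rest row_width
  let part := PySem.Int.mod rest row_width
  (code, first) :: (List.replicate full.toNat (code, row_width) ++
    (if part ≠ 0 then [(code, part)] else []))

def pvB_pass1 (row_width : Int) (runs : List (Int × Int)) : List (Int × Int) :=
  (runs.foldl (fun (acc : List (Int × Int) × Int) p =>
      if p.2 ≤ 0 then acc
      else (acc.1 ++ pvB_segs row_width acc.2 p.1 p.2,
            PySem.Int.mod (acc.2 + p.2) row_width)) ([], 0)).1

-- Source B pass 2 step: accumulate a segment into the current row, flush at row_width
def pvB_step (row_width : Int)
    (st : List (List (Int × Int)) × List (Int × Int) × Int) (seg : Int × Int) :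
    List (List (Int × Int)) × List (Int × Int) × Int :=
  let row := st.2.1 ++ [seg]
  let w := st.2.2 + seg.2
  if w = row_width then (st.1 ++ [row], [], 0) else (st.1, row, w)

def split_rle_runs_to_rows_alt (rle_runs : List (Int × Int)) (row_width : Int) : List (List (Int × Int)) :=
  let st := (pvB_pass1 row_width rle_runs).foldl (pvB_step row_width)
    (([], [], 0) : List (List (Int × Int)) × List (Int × Int) × Int)
  if st.2.1 ≠ [] then st.1 ++ [st.2.1] else st.1

-- ===== PRECONDITION & SPEC =====
-- Pre_ is exactly the set of inputs on which the Python A terminates: with row_width ≤ 0 and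
-- any positive count, A's inner loop never makes progress (use ≤ 0) and diverges.
def Pre_split_rle_runs_to_rows (rle_runs : List (Int × Int)) (row_width : Int) : Prop :=
  0 < row_width ∨ ∀ p ∈ rle_runs, p.2 ≤ 0
instance (rle_runs : List (Int × Int)) (row_width : Int) : Decidable (Pre_split_rle_runs_to_rows rle_runs row_width) := by unfold Pre_split_rle_runs_to_rows; infer_instance
def pvWitness_split_rle_runs_to_rows : (List (Int × Int)) × Int := ([(1, 5), (2, 3)], 3)

def Spec_split_rle_runs_to_rows (rle_runs : List (Int × Int)) (row_width : Int) (out : List (List (Int × Int))) : Prop := out = split_rle_runs_to_rows_alt rle_runs row_width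
instance (rle_runs : List (Int × Int)) (row_width : Int) (out : List (List (Int × Int))) : Decidable (Spec_split_rle_runs_to_rows rle_runs row_width out) := by unfold Spec_split_rle_runs_to_rows; infer_instance

-- ===== CLAIM (what is proved, stated in full; the proofs are below) =====
def Claim_equal_split_rle_runs_to_rows : Prop := ∀ (rle_runs : List (Int × Int)) (row_width : Int), Dom_split_rle_runs_to_rows rle_runs row_width → Pre_split_rle_runs_to_rows rle_runs row_width → Spec_split_rle_runs_to_rows rle_runs row_width (split_rle_runs_to_rows rle_runs row_width)

-- ===== LEMMAS AND PROOFS =====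

-- proof-only recursive form of pass 1
def pvSegsRec (rw : Int) : Int → List (Int × Int) → List (Int × Int)
  | _, [] => []
  | cols, p :: ps =>
    if p.2 ≤ 0 then pvSegsRec rw cols ps
    else pvB_segs rw cols p.1 p.2 ++ pvSegsRec rw (PySem.Int.mod (cols + p.2) rw) ps

theorem pvA_inner_nonpos (rw : Int) (fuel : Nat) (code count : Int)
    (st : List (List (Int × Int)) × List (Int × Int) × Int) (h : count ≤ 0) :
    pvA_inner rw fuel code count st = st := by
  obtain ⟨rows, cur, cols⟩ := st
  cases fuel with
  | zero => rfl
  | succ f => simp [pvA_inner, not_lt.mpr h]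

-- cols = 0 case of the run lemma: A's loop equals the grouping fold over the closed-form
-- whole-row/partial segments, and the resulting column counter is count % rw
theorem pvA_inner_zero (rw : Int) (hw : 0 < rw) (code : Int) :
    ∀ fuel count (rows : List (List (Int × Int))), 0 ≤ count → count.toNat ≤ fuel →
    pvA_inner rw fuel code count (rows, [], 0)
      = (List.replicate (PySem.Int.floordiv count rw).toNat (code, rw) ++
          (if PySem.Int.mod count rw ≠ 0 then [(code, PySem.Int.mod count rw)] else [])).foldl
          (pvB_step rw) (rows, [], 0) := by
  intro fuel
  induction fuel with
  | zero =>
    intro count rows h0 hf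
    have hc : count = 0 := by omega
    subst hc
    simp [pvA_inner, PySem.Int.floordiv_eq_ediv_of_pos hw, PySem.Int.mod_eq_emod_of_pos hw]
  | succ f ih =>
    intro count rows h0 hf
    by_cases hc : 0 < count
    · rw [PySem.Int.floordiv_eq_ediv_of_pos hw, PySem.Int.mod_eq_emod_of_pos hw]
      by_cases h2 : count < rw
      · -- the run ends inside the current (empty) row
        have hdiv : count / rw = 0 := Int.ediv_eq_zero_of_lt h0 h2
        have hmod : count % rw = count := Int.emod_eq_of_lt h0 h2
        have hne : ¬ (0 + count = rw) := by omega
        have hstep : pvA_inner rw (f + 1) code count (rows, [], 0)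
            = (rows, [(code, count)], 0 + count) := by
          simp only [pvA_inner, if_pos hc, sub_zero, min_eq_left (le_of_lt h2),
            if_neg hne, sub_self, List.nil_append]
          exact pvA_inner_nonpos rw f code 0 _ le_rfl
        rw [hstep, hdiv, hmod]
        simp only [Int.toNat_zero, List.replicate_zero, List.nil_append,
          if_pos (by omega : count ≠ 0), List.foldl_cons, List.foldl_nil]
        simp [pvB_step, show ¬count = rw from by omega]
      · have h2 : rw ≤ count := by omega
        -- a full row is emitted and the loop continues at column 0
        have hstep : pvA_inner rw (f + 1) code count (rows, [], 0)
            = pvA_inner rw f code (count - rw) (rows ++ [[(code, rw)]], [], 0) := by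
          simp only [pvA_inner, if_pos hc, sub_zero, min_eq_right h2, zero_add,
            List.nil_append]
          simp
        have hdiv : count / rw = (count - rw) / rw + 1 := by
          have h' : (count - rw + 1 * rw) / rw = (count - rw) / rw + 1 :=
            Int.add_mul_ediv_right (count - rw) 1 (by omega)
          have h'' : count - rw + 1 * rw = count := by ring
          rw [h''] at h'; exact h'
        have hmod : count % rw = (count - rw) % rw := (Int.sub_emod_right count rw).symm
        have hq0 : 0 ≤ (count - rw) / rw := Int.ediv_nonneg (by omega) (by omega)
        have htn : (count / rw).toNat = ((count - rw) / rw).toNat + 1 := by omega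
        rw [hstep, ih (count - rw) (rows ++ [[(code, rw)]]) (by omega) (by omega),
          PySem.Int.floordiv_eq_ediv_of_pos hw, PySem.Int.mod_eq_emod_of_pos hw,
          hmod, htn, List.replicate_succ, List.cons_append, List.foldl_cons]
        congr 1
        simp [pvB_step]
    · have hc0 : count = 0 := by omega
      subst hc0
      simp [pvA_inner, PySem.Int.floordiv_eq_ediv_of_pos hw, PySem.Int.mod_eq_emod_of_pos hw]

-- one run entered at column cols: A's inner loop = grouping fold over pvB_segs
theorem pvA_inner_run (rw : Int) (hw : 0 < rw) (code : Int) :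
    ∀ fuel count cols (rows : List (List (Int × Int))) (cur : List (Int × Int)),
    0 ≤ cols → cols < rw → 0 < count → count.toNat ≤ fuel →
    pvA_inner rw fuel code count (rows, cur, cols)
      = (pvB_segs rw cols code count).foldl (pvB_step rw) (rows, cur, cols) := by
  intro fuel count cols rows cur h0 h1 hc hf
  obtain ⟨f, rfl⟩ : ∃ f, fuel = f + 1 := ⟨fuel - 1, by omega⟩
  by_cases hA : count ≤ rw - cols
  · -- the whole run fits in the current row
    have hsegs : pvB_segs rw cols code count = [(code, count)] := by
      simp [pvB_segs, min_eq_left hA, PySem.Int.floordiv_eq_ediv_of_pos hw,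
        PySem.Int.mod_eq_emod_of_pos hw]
    rw [hsegs, List.foldl_cons, List.foldl_nil]
    have hloop : pvA_inner rw (f + 1) code count (rows, cur, cols)
        = if cols + count = rw then (rows ++ [cur ++ [(code, count)]], [], 0)
          else (rows, cur ++ [(code, count)], cols + count) := by
      simp only [pvA_inner, if_pos hc, min_eq_left hA, sub_self]
      by_cases hfl : cols + count = rw
      · simp [hfl, pvA_inner_nonpos rw f code 0 _ le_rfl]
      · simp [hfl, pvA_inner_nonpos rw f code 0 _ le_rfl]
    rw [hloop]
    by_cases hfl : cols + count = rw
    · simp [pvB_step, hfl]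
    · simp [pvB_step, hfl]
  · have hB : rw - cols < count := by omega
    -- the run fills up the current row and continues at column 0
    have hfirst : min count (rw - cols) = rw - cols := min_eq_right (by omega)
    have hrest : 0 < count - (rw - cols) := by omega
    have hsegs : pvB_segs rw cols code count = (code, rw - cols) ::
        (List.replicate (PySem.Int.floordiv (count - (rw - cols)) rw).toNat (code, rw) ++
          (if PySem.Int.mod (count - (rw - cols)) rw ≠ 0
            then [(code, PySem.Int.mod (count - (rw - cols)) rw)] else [])) := by
      simp [pvB_segs, hfirst]
    rw [hsegs, List.foldl_cons]
    have hstep : pvA_inner rw (f + 1) code count (rows, cur, cols)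
        = pvA_inner rw f code (count - (rw - cols))
            (rows ++ [cur ++ [(code, rw - cols)]], [], 0) := by
      simp only [pvA_inner, if_pos hc, hfirst, if_pos (by omega : cols + (rw - cols) = rw)]
    have hstepB : pvB_step rw (rows, cur, cols) (code, rw - cols)
        = (rows ++ [cur ++ [(code, rw - cols)]], [], 0) := by
      simp [pvB_step, show cols + (rw - cols) = rw from by omega]
    rw [hstep, hstepB,
      pvA_inner_zero rw hw code f (count - (rw - cols)) _ (by omega) (by omega)]

-- the grouping fold flushes each whole-row segment immediately
theorem pvB_flush_replicate (rw code : Int) :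
    ∀ (n : Nat) (rows : List (List (Int × Int))),
    (List.replicate n ((code, rw) : Int × Int)).foldl (pvB_step rw) (rows, [], 0)
      = (rows ++ List.replicate n [(code, rw)], [], 0) := by
  intro n
  induction n with
  | zero => intro rows; simp
  | succ m ih =>
    intro rows
    rw [List.replicate_succ, List.foldl_cons,
      show pvB_step rw (rows, [], 0) (code, rw) = (rows ++ [[(code, rw)]], [], 0) from by
        simp [pvB_step],
      ih]
    simp [List.replicate_succ]

-- the third component of the grouping fold tracks the column counter mod rw
theorem pvB_cols_zero (rw : Int) (hw : 0 < rw) (code count : Int) (_h0 : 0 ≤ count) :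
    ∀ (rows : List (List (Int × Int))),
    (((List.replicate (PySem.Int.floordiv count rw).toNat (code, rw) ++
        (if PySem.Int.mod count rw ≠ 0 then [(code, PySem.Int.mod count rw)] else [])).foldl
        (pvB_step rw) (rows, [], 0)).2.2) = PySem.Int.mod count rw := by
  intro rows
  rw [List.foldl_append, pvB_flush_replicate]
  by_cases hm : PySem.Int.mod count rw = 0
  · simp [hm]
  · have hlt : PySem.Int.mod count rw < rw := PySem.Int.mod_lt (a := count) hw
    simp [hm, pvB_step, show ¬ PySem.Int.mod count rw = rw from by omega]

theorem pvB_cols_run (rw : Int) (hw : 0 < rw) (code count cols : Int)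
    (h0 : 0 ≤ cols) (_h1 : cols < rw) (hc : 0 < count) :
    ∀ (rows : List (List (Int × Int))) (cur : List (Int × Int)),
    (((pvB_segs rw cols code count).foldl (pvB_step rw) (rows, cur, cols)).2.2)
      = PySem.Int.mod (cols + count) rw := by
  intro rows cur
  by_cases hA : count ≤ rw - cols
  · have hsegs : pvB_segs rw cols code count = [(code, count)] := by
      simp [pvB_segs, min_eq_left hA, PySem.Int.floordiv_eq_ediv_of_pos hw,
        PySem.Int.mod_eq_emod_of_pos hw]
    rw [hsegs, List.foldl_cons, List.foldl_nil]
    by_cases hfl : cols + count = rw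
    · simp [pvB_step, hfl, PySem.Int.mod_eq_emod_of_pos hw]
    · simp [pvB_step, hfl, PySem.Int.mod_eq_emod_of_pos hw,
        (Int.emod_eq_of_lt (by omega) (by omega) : (cols + count) % rw = cols + count)]
  · have hfirst : min count (rw - cols) = rw - cols := min_eq_right (by omega)
    have hsegs : pvB_segs rw cols code count = (code, rw - cols) ::
        (List.replicate (PySem.Int.floordiv (count - (rw - cols)) rw).toNat (code, rw) ++
          (if PySem.Int.mod (count - (rw - cols)) rw ≠ 0
            then [(code, PySem.Int.mod (count - (rw - cols)) rw)] else [])) := by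
      simp [pvB_segs, hfirst]
    rw [hsegs, List.foldl_cons,
      show pvB_step rw (rows, cur, cols) (code, rw - cols)
          = (rows ++ [cur ++ [(code, rw - cols)]], [], 0) from by
        simp [pvB_step, show cols + (rw - cols) = rw from by omega],
      pvB_cols_zero rw hw code (count - (rw - cols)) (by omega)]
    rw [PySem.Int.mod_eq_emod_of_pos hw, PySem.Int.mod_eq_emod_of_pos hw,
      show count - (rw - cols) = (cols + count) - rw from by ring,
      Int.sub_emod_right]

-- pass 1's fold is pvSegsRec
theorem pvB_pass1_eq (rw : Int) :
    ∀ (runs : List (Int × Int)) (s0 : List (Int × Int)) (cols : Int),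
    (runs.foldl (fun (acc : List (Int × Int) × Int) p =>
        if p.2 ≤ 0 then acc
        else (acc.1 ++ pvB_segs rw acc.2 p.1 p.2,
              PySem.Int.mod (acc.2 + p.2) rw)) (s0, cols)).1
      = s0 ++ pvSegsRec rw cols runs := by
  intro runs
  induction runs with
  | nil => intro s0 cols; simp [pvSegsRec]
  | cons p ps ih =>
    intro s0 cols
    by_cases h : p.2 ≤ 0
    · simp [pvSegsRec, h, ih]
    · simp [pvSegsRec, h, ih, List.append_assoc]

-- main induction over the runs
theorem pv_main (rw : Int) (hw : 0 < rw) :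
    ∀ (runs : List (Int × Int)) (rows : List (List (Int × Int))) (cur : List (Int × Int))
      (cols : Int), 0 ≤ cols → cols < rw →
    runs.foldl (fun st p => pvA_inner rw p.2.toNat p.1 p.2 st) (rows, cur, cols)
      = (pvSegsRec rw cols runs).foldl (pvB_step rw) (rows, cur, cols) := by
  intro runs
  induction runs with
  | nil => intro rows cur cols _ _; rfl
  | cons p ps ih =>
    intro rows cur cols h0 h1
    by_cases hp : p.2 ≤ 0
    · rw [List.foldl_cons, pvA_inner_nonpos rw p.2.toNat p.1 p.2 _ hp]
      simp only [pvSegsRec, if_pos hp]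
      exact ih rows cur cols h0 h1
    · rw [List.foldl_cons,
        pvA_inner_run rw hw p.1 p.2.toNat p.2 cols rows cur h0 h1 (by omega) le_rfl]
      simp only [pvSegsRec, if_neg hp, List.foldl_append]
      have hr3 : ((pvB_segs rw cols p.1 p.2).foldl (pvB_step rw) (rows, cur, cols)).2.2
          = PySem.Int.mod (cols + p.2) rw :=
        pvB_cols_run rw hw p.1 p.2 cols h0 h1 (by omega) rows cur
      have hnn : 0 ≤ PySem.Int.mod (cols + p.2) rw := PySem.Int.mod_nonneg (a := cols + p.2) hw
      have hlt : PySem.Int.mod (cols + p.2) rw < rw := PySem.Int.mod_lt (a := cols + p.2) hw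
      rcases hS : (pvB_segs rw cols p.1 p.2).foldl (pvB_step rw) (rows, cur, cols)
        with ⟨r1, r2, r3⟩
      rw [hS] at hr3
      simp only [] at hr3
      rw [← hr3]
      exact ih r1 r2 r3 (hr3 ▸ hnn) (hr3 ▸ hlt)

theorem pv_all_nonpos_A (rw : Int) :
    ∀ (runs : List (Int × Int)) (st : List (List (Int × Int)) × List (Int × Int) × Int),
    (∀ p ∈ runs, p.2 ≤ 0) →
    runs.foldl (fun st p => pvA_inner rw p.2.toNat p.1 p.2 st) st = st := by
  intro runs
  induction runs with
  | nil => intro st _; rfl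
  | cons p ps ih =>
    intro st h
    simp only [List.foldl_cons, pvA_inner_nonpos rw _ _ _ st (h p (by simp))]
    exact ih st (fun q hq => h q (by simp [hq]))

theorem pv_all_nonpos_segs (rw : Int) :
    ∀ (runs : List (Int × Int)) (cols : Int), (∀ p ∈ runs, p.2 ≤ 0) →
    pvSegsRec rw cols runs = [] := by
  intro runs
  induction runs with
  | nil => intro cols _; rfl
  | cons p ps ih =>
    intro cols h
    simp [pvSegsRec, h p (by simp), ih _ (fun q hq => h q (by simp [hq]))]

-- ===== VERDICT (by name: the statement is the Claim_ definition above) =====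
theorem split_rle_runs_to_rows_spec : Claim_equal_split_rle_runs_to_rows := by
  intro runs rw _ hpre
  unfold Spec_split_rle_runs_to_rows split_rle_runs_to_rows split_rle_runs_to_rows_alt
  rcases hpre with hw | hnp
  · rw [pv_main rw hw runs [] [] 0 le_rfl hw,
      show pvB_pass1 rw runs = pvSegsRec rw 0 runs from pvB_pass1_eq rw runs [] 0]
  · rw [pv_all_nonpos_A rw runs _ hnp,
      show pvB_pass1 rw runs = [] by
        rw [show pvB_pass1 rw runs = pvSegsRec rw 0 runs from pvB_pass1_eq rw runs [] 0,
          pv_all_nonpos_segs rw runs 0 hnp]]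
    rfl
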